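-- pv_equiv track=rewrite | github.com/CHG1007/Algorithm | 백준/Silver/1652. 누울 자리를 찾아라/누울 자리를 찾아라.py | col
-- ===== SOURCE A (Python) =====
-- def col(Map):
--     ans = 0
--     for line in Map:
--         cnt = 0
--         for i in range(len(line)):
--             if line[i] == '.':
--                 cnt += 1
--             else:
--                 cnt = 0
--             if cnt == 2:
--                 ans += 1
--     return ans
-- ===== SOURCE B (Python) =====
-- def col(Map):
--     # Run-length scan: count maximal runs of '.' of length >= 2 in each row.
--     ans = 0
--     for line in Map:
--         i, n = 0, len(line)
--         while i < n:
--             j = i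
--             while j < n and line[j] == line[i]:
--                 j += 1
--             if line[i] == '.' and j - i >= 2:
--                 ans += 1
--             i = j
--     return ans
-- ===== Notes on version B (the rewrite author's own statement) =====
-- stated objective: alternative
-- what changed: Replaces A's per-character running-counter state machine (cnt reset/increment, trigger at cnt==2) with a run-length scan that finds each maximal run of equal characters and counts dot-runs of length >= 2.
import Mathlib
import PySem

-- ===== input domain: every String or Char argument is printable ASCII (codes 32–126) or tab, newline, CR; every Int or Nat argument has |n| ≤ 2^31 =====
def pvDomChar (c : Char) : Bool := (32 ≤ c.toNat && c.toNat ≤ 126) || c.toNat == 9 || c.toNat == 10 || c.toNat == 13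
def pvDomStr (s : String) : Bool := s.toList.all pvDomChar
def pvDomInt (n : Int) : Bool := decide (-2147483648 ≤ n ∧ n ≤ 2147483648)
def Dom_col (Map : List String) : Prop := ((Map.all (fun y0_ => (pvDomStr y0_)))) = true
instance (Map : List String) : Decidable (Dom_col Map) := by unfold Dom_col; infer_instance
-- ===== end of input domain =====

-- B replaces A's per-character running counter with a run-length scan over maximal
-- runs of equal characters; same cost, different algorithm (objective: alternative).

-- ===== PORT A =====
-- per-char state machine: state = (ans, cnt)
def col (Map : List String) : Int :=
  Map.foldl
    (fun ans line =>
      (line.toList.foldl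
        (fun (p : Int × Int) c =>
          let cnt := if c = '.' then p.2 + 1 else 0
          (if cnt = 2 then p.1 + 1 else p.1, cnt))
        (ans, 0)).1)
    0

-- ===== PORT B =====
-- maximal runs of equal characters, front to back (the inner `while j < n` is the
-- takeWhile over the rest; `i = j` is the dropWhile)
def runsB (l : List Char) : List (Char × Nat) :=
  match l with
  | [] => []
  | c :: rest =>
      (c, (rest.takeWhile (fun x => x = c)).length + 1)
        :: runsB (rest.dropWhile (fun x => x = c))
termination_by l.length
decreasing_by
  have := List.length_dropWhile_le (fun x => x = c) rest
  simp; omega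

def col_alt (Map : List String) : Int :=
  Map.foldl
    (fun ans line =>
      (runsB line.toList).foldl
        (fun a p => if p.1 = '.' ∧ 2 ≤ p.2 then a + 1 else a) ans)
    0

-- ===== PRECONDITION & SPEC =====
def Spec_col (Map : List String) (out : Int) : Prop := out = col_alt Map
instance (Map : List String) (out : Int) : Decidable (Spec_col Map out) := by unfold Spec_col; infer_instance

-- ===== CLAIM (what is proved, stated in full; the proofs are below) =====
def Claim_equal_col : Prop := ∀ (Map : List String), Dom_col Map → Spec_col Map (col Map)

-- ===== LEMMAS AND PROOFS =====

-- A's per-line count, recursively, with the running counter as argument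
def countA (cnt : Int) : List Char → Int
  | [] => 0
  | c :: l =>
      if c = '.' then (if cnt + 1 = 2 then 1 else 0) + countA (cnt + 1) l
      else countA 0 l

-- B's per-line count, recursively
def cntRuns : List (Char × Nat) → Int
  | [] => 0
  | p :: t => (if p.1 = '.' ∧ 2 ≤ p.2 then 1 else 0) + cntRuns t

-- A's inner fold computes ans + countA
lemma foldA_fst (l : List Char) (ans cnt : Int) :
    (l.foldl
      (fun (p : Int × Int) c =>
        let cnt := if c = '.' then p.2 + 1 else 0
        (if cnt = 2 then p.1 + 1 else p.1, cnt))
      (ans, cnt)).1 = ans + countA cnt l := by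
  induction l generalizing ans cnt with
  | nil => simp [countA]
  | cons c l ih =>
      simp only [List.foldl_cons, countA]
      by_cases hc : c = '.'
      · by_cases h2 : cnt + 1 = 2
        · simp [hc, h2, ih]; ring
        · simp [hc, h2, ih]
      · simp [hc, ih]

-- B's inner fold computes ans + cntRuns
lemma foldB_shift (L : List (Char × Nat)) (a : Int) :
    L.foldl (fun a p => if p.1 = '.' ∧ 2 ≤ p.2 then a + 1 else a) a = a + cntRuns L := by
  induction L generalizing a with
  | nil => simp [cntRuns]
  | cons p t ih =>
      simp only [List.foldl_cons, cntRuns]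
      by_cases h : p.1 = '.' ∧ 2 ≤ p.2
      · simp [h, ih]; ring
      · simp [h, ih]

-- if the list starts with a non-dot (or is empty), the running counter is irrelevant
lemma countA_head_not_dot (d : List Char) (cnt : Int)
    (hd : ∀ x xs, d = x :: xs → x ≠ '.') : countA cnt d = countA 0 d := by
  cases d with
  | nil => rfl
  | cons x xs =>
      have hx := hd x xs rfl
      simp [countA, hx]

lemma head_dropWhile {p : Char → Bool} : ∀ (l : List Char) {x xs},
    l.dropWhile p = x :: xs → p x = false := by
  intro l
  induction l with
  | nil => intro x xs h; simp [List.dropWhile] at h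
  | cons c t ih =>
      intro x xs h
      by_cases hc : p c = true
      · rw [List.dropWhile_cons_of_pos hc] at h; exact ih h
      · rw [List.dropWhile_cons_of_neg hc] at h
        cases h; simpa using hc

-- processing a run of dots with counter already ≥ 2 adds nothing
lemma countA_dots_ge2 (t : List Char) (ht : ∀ x ∈ t, x = '.') (d : List Char)
    (cnt : Int) (h2 : 2 ≤ cnt) : countA cnt (t ++ d) = countA (cnt + t.length) d := by
  induction t generalizing cnt with
  | nil => simp
  | cons c t ih =>
      have hc : c = '.' := ht c (by simp)
      have hne : cnt + 1 ≠ 2 := by omega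
      simp only [List.cons_append, countA, hc, if_neg hne]
      rw [ih (fun x hx => ht x (by simp [hx])) (cnt + 1) (by omega)]
      rw [if_pos trivial]
      simp only [List.length_cons]
      push_cast
      ring_nf

-- a run of equal non-dot characters contributes nothing and leaves the counter at 0
lemma countA_nondots (t : List Char) (hne : ∀ x ∈ t, x ≠ '.') (d : List Char) :
    countA 0 (t ++ d) = countA 0 d := by
  induction t with
  | nil => simp
  | cons c t ih =>
      have hc : c ≠ '.' := hne c (by simp)
      simp only [List.cons_append, countA, if_neg hc]
      exact ih (fun x hx => hne x (by simp [hx]))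

lemma countA_eq_cntRuns : ∀ n (l : List Char), l.length ≤ n →
    countA 0 l = cntRuns (runsB l) := by
  intro n
  induction n with
  | zero =>
      intro l hl
      have h0 : l = [] := List.eq_nil_of_length_eq_zero (Nat.le_zero.mp hl)
      subst h0; simp [countA, runsB, cntRuns]
  | succ n ih =>
      intro l hl
      cases l with
      | nil => simp [countA, runsB, cntRuns]
      | cons c rest =>
          rw [runsB]
          simp only [List.length_cons, Nat.add_le_add_iff_right] at hl
          by_cases hc : c = '.'
          · subst hc
            simp only [countA, cntRuns]
            norm_num
            cases rest with
            | nil => simp [countA, runsB, cntRuns]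
            | cons x rest' =>
                by_cases hx : x = '.'
                · subst hx
                  rw [List.takeWhile_cons_of_pos (by simp), List.dropWhile_cons_of_pos (by simp)]
                  have hsplit : (rest'.takeWhile (fun y => y = '.')) ++ (rest'.dropWhile (fun y => y = '.')) = rest' :=
                    List.takeWhile_append_dropWhile
                  have ht : ∀ y ∈ rest'.takeWhile (fun y => y = '.'), y = '.' := by
                    intro y hy
                    have := List.mem_takeWhile_imp hy
                    simpa using this
                  have hdnd : ∀ z zs, rest'.dropWhile (fun y => y = '.') = z :: zs → z ≠ '.' := by
                    intro z zs hz
                    have := head_dropWhile rest' hz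
                    simpa using this
                  have hdlen : (rest'.dropWhile (fun y => y = '.')).length ≤ n := by
                    have h1 := List.length_dropWhile_le (fun y => decide (y = '.')) rest'
                    simp only [List.length_cons] at hl
                    omega
                  have hLHS : countA 1 ('.' :: rest') = 1 + countA 0 (rest'.dropWhile (fun y => y = '.')) := by
                    simp only [countA]
                    norm_num
                    conv_lhs => rw [← hsplit]
                    rw [countA_dots_ge2 _ ht _ 2 (by omega)]
                    rw [countA_head_not_dot _ _ hdnd]
                  rw [hLHS, ih _ hdlen]
                  simp
                · rw [List.takeWhile_cons_of_neg (by simpa using hx), List.dropWhile_cons_of_neg (by simpa using hx)]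
                  have hLHS : countA 1 (x :: rest') = countA 0 (x :: rest') := by
                    simp [countA, hx]
                  rw [hLHS, ih _ hl]
                  simp
          · have ht : ∀ y ∈ rest.takeWhile (fun y => y = c), y ≠ '.' := by
              intro y hy
              have := List.mem_takeWhile_imp hy
              have hyc : y = c := by simpa using this
              rw [hyc]; exact hc
            have hsplit : (rest.takeWhile (fun y => y = c)) ++ (rest.dropWhile (fun y => y = c)) = rest :=
              List.takeWhile_append_dropWhile
            have hdlen : (rest.dropWhile (fun y => y = c)).length ≤ n := by
              have h1 := List.length_dropWhile_le (fun y => decide (y = c)) rest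
              omega
            have hLHS : countA 0 (c :: rest) = countA 0 (rest.dropWhile (fun y => y = c)) := by
              simp only [countA, if_neg hc]
              conv_lhs => rw [← hsplit]
              exact countA_nondots _ ht _
            rw [hLHS, ih _ hdlen]
            simp [cntRuns, hc]

-- per line, the two inner computations agree
lemma line_eq (line : String) (ans : Int) :
    (line.toList.foldl
      (fun (p : Int × Int) c =>
        let cnt := if c = '.' then p.2 + 1 else 0
        (if cnt = 2 then p.1 + 1 else p.1, cnt))
      (ans, 0)).1
    = (runsB line.toList).foldl
        (fun a p => if p.1 = '.' ∧ 2 ≤ p.2 then a + 1 else a) ans := by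
  rw [foldA_fst, foldB_shift, countA_eq_cntRuns line.toList.length line.toList le_rfl]

lemma col_eq (Map : List String) : col Map = col_alt Map := by
  unfold col col_alt
  induction Map using List.reverseRecOn with
  | nil => rfl
  | append_singleton l line ih =>
      simp only [List.foldl_append, List.foldl_cons, List.foldl_nil]
      rw [ih, line_eq]

-- ===== VERDICT (by name: the statement is the Claim_ definition above) =====
theorem col_spec : Claim_equal_col := by
  intro Map _
  unfold Spec_col
  exact col_eq Map
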